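-- pv_equiv track=rewrite | github.com/holbizmetrics/prime-alphabet-finder | prime_encoder_extended.py | czech_number_word
-- ===== SOURCE A (Python) =====
-- def czech_number_word(n: int) -> str:
--     if n == 0: return "nula"
--     ones = ["", "jedna", "dva", "tri", "ctyri", "pet", "sest", "sedm", "osm", "devet",
--             "deset", "jedenact", "dvanact", "trinact", "ctrnact", "patnact",
--             "sestnact", "sedmnact", "osmnact", "devatenact"]
--     tens = ["", "", "dvacet", "tricet", "ctyricet", "padesat", "sedesat", "sedmdesat", "osmdesat", "devadesat"]
--     if n < 20: return ones[n]
--     elif n < 100: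
--         if n % 10 == 0: return tens[n // 10]
--         return tens[n // 10] + " " + ones[n % 10]
--     elif n < 1000:
--         if n // 100 == 1: prefix = "sto"
--         elif n // 100 == 2: prefix = "dveste"
--         else: prefix = ones[n // 100] + " set"
--         return prefix + (" " + czech_number_word(n % 100) if n % 100 else "")
--     return str(n)
-- ===== SOURCE B (Python) =====
-- def czech_number_word(n: int) -> str:
--     if n == 0:
--         return "nula"
--     ones = ["", "jedna", "dva", "tri", "ctyri", "pet", "sest", "sedm", "osm", "devet",
--             "deset", "jedenact", "dvanact", "trinact", "ctrnact", "patnact",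
--             "sestnact", "sedmnact", "osmnact", "devatenact"]
--     tens = ["", "", "dvacet", "tricet", "ctyricet", "padesat", "sedesat", "sedmdesat", "osmdesat", "devadesat"]
--     if n < 0 or n >= 1000:
--         return str(n)
--     if n < 20:
--         return ones[n]
--     parts = []
--     if n >= 100:
--         h = n // 100
--         parts.append("sto" if h == 1 else "dveste" if h == 2 else ones[h] + " set")
--     r = n % 100
--     if 0 < r < 20:
--         parts.append(ones[r])
--     elif r >= 20:
--         parts.append(tens[r // 10])
--         if r % 10:
--             parts.append(ones[r % 10])
--     return " ".join(parts)
-- ===== Notes on version B (the rewrite author's own statement) =====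
-- stated objective: alternative
-- what changed: Replaces A's one-level recursion with a flat single pass that collects place-value tokens (hundreds prefix, tens, ones) into a list and joins them with spaces, and routes all out-of-range inputs (negative or >= 1000) through the str(n) fallback.
-- intended difference: For -20 <= n <= -1 A's negative list index wraps around and returns an unrelated word (e.g. 'devatenact' for -1, '' for -20); B returns str(n) there, the intended fallback for numbers it cannot spell. — e.g. on czech_number_word(-1): A returns "devatenact", B returns "-1"
import Mathlib
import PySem

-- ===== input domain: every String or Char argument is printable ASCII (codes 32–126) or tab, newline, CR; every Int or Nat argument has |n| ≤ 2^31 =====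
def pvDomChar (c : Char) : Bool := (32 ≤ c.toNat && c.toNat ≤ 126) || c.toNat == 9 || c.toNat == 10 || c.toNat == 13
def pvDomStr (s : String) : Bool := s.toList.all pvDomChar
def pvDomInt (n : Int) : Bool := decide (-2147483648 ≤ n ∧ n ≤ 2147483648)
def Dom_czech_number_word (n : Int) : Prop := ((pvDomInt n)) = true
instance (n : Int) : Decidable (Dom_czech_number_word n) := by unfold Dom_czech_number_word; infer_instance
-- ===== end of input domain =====

-- B replaces A's one-level recursion with a flat token-list pass joined by spaces (alternative
-- decomposition, same cost); for negative n (where A wraps a negative index or raises) B returns str(n).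


-- ===== PORT A =====
def czechOnes : List String :=
  ["", "jedna", "dva", "tri", "ctyri", "pet", "sest", "sedm", "osm", "devet",
   "deset", "jedenact", "dvanact", "trinact", "ctrnact", "patnact",
   "sestnact", "sedmnact", "osmnact", "devatenact"]

def czechTens : List String :=
  ["", "", "dvacet", "tricet", "ctyricet", "padesat", "sedesat", "sedmdesat", "osmdesat", "devadesat"]

def czechGo : Nat → Int → String
  | 0, _ => ""   -- fuel exhausted; unreachable for the fuel czech_number_word supplies
  | fuel+1, n =>
    if n = 0 then "nula"
    else if n < 20 then (PySem.List.pyGet? czechOnes n).getD ""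
    else if n < 100 then
      if PySem.Int.mod n 10 = 0 then (PySem.List.pyGet? czechTens (PySem.Int.floordiv n 10)).getD ""
      else (PySem.List.pyGet? czechTens (PySem.Int.floordiv n 10)).getD "" ++ " "
           ++ (PySem.List.pyGet? czechOnes (PySem.Int.mod n 10)).getD ""
    else if n < 1000 then
      let pre : String :=
        if PySem.Int.floordiv n 100 = 1 then "sto"
        else if PySem.Int.floordiv n 100 = 2 then "dveste"
        else (PySem.List.pyGet? czechOnes (PySem.Int.floordiv n 100)).getD "" ++ " set"
      pre ++ (if PySem.Int.mod n 100 ≠ 0 then " " ++ czechGo fuel (PySem.Int.mod n 100) else "")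
    else PySem.Int.toStr n

-- literal transliteration of A (the fuel only makes the recursion structural; it is never exhausted)
def czech_number_word (n : Int) : String := czechGo (n.toNat + 1) n

-- ===== PORT B =====
def czech_number_word_alt (n : Int) : String :=
  if n = 0 then "nula"
  else if n < 0 ∨ 1000 ≤ n then PySem.Int.toStr n
  else if n < 20 then (PySem.List.pyGet? czechOnes n).getD ""
  else
    let parts0 : List String :=
      if 100 ≤ n then
        let h := PySem.Int.floordiv n 100
        [if h = 1 then "sto" else if h = 2 then "dveste"
         else (PySem.List.pyGet? czechOnes h).getD "" ++ " set"]
      else []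
    let r := PySem.Int.mod n 100
    let parts : List String :=
      if 0 < r ∧ r < 20 then parts0 ++ [(PySem.List.pyGet? czechOnes r).getD ""]
      else if 20 ≤ r then
        parts0 ++ [(PySem.List.pyGet? czechTens (PySem.Int.floordiv r 10)).getD ""]
          ++ (if PySem.Int.mod r 10 ≠ 0 then [(PySem.List.pyGet? czechOnes (PySem.Int.mod r 10)).getD ""] else [])
      else parts0
    PySem.Str.join " " parts

-- ===== PRECONDITION & SPEC =====
-- Pre_ excludes exactly the inputs n < -20 on which A raises IndexError (ones[n] with a
-- negative index past the start of the 20-element list); B returns str(n) there.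
def Pre_czech_number_word (n : Int) : Prop := -20 ≤ n
instance (n : Int) : Decidable (Pre_czech_number_word n) := by unfold Pre_czech_number_word; infer_instance
def pvWitness_czech_number_word : Int := (125)

-- For -20 <= n <= -1 A's negative list index wraps around and returns an unrelated word
-- (e.g. 'devatenact' for -1, '' for -20); B returns str(n) there, the intended fallback for
-- numbers it cannot spell.
def D_czech_number_word (n : Int) : Prop := -20 ≤ n ∧ n < 0
instance (n : Int) : Decidable (D_czech_number_word n) := by unfold D_czech_number_word; infer_instance

def Spec_czech_number_word (n : Int) (out : String) : Prop := ¬ D_czech_number_word n → out = czech_number_word_alt n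
instance (n : Int) (out : String) : Decidable (Spec_czech_number_word n out) := by unfold Spec_czech_number_word; infer_instance

def pvDiffWitness_czech_number_word : Int := (-1)
def pvDiffWitnessOut_czech_number_word : String × String := ("devatenact", "-1")

-- ===== CLAIM (what is proved, stated in full; the proofs are below) =====
def Claim_unchanged_czech_number_word : Prop := ∀ (n : Int), Dom_czech_number_word n → Pre_czech_number_word n → Spec_czech_number_word n (czech_number_word n)
def Claim_changed_czech_number_word : Prop := Dom_czech_number_word (pvDiffWitness_czech_number_word) ∧ Pre_czech_number_word (pvDiffWitness_czech_number_word) ∧ D_czech_number_word (pvDiffWitness_czech_number_word) ∧ czech_number_word (pvDiffWitness_czech_number_word) = pvDiffWitnessOut_czech_number_word.1 ∧ czech_number_word_alt (pvDiffWitness_czech_number_word) = pvDiffWitnessOut_czech_number_word.2 ∧ pvDiffWitnessOut_czech_number_word.1 ≠ pvDiffWitnessOut_czech_number_word.2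
def Claim_exact_czech_number_word : Prop := ∀ (n : Int), Dom_czech_number_word n → Pre_czech_number_word n → D_czech_number_word n → czech_number_word n ≠ czech_number_word_alt n

-- ===== LEMMAS AND PROOFS =====

-- czechGo does not consume fuel below 100 (the recursive branch is unreachable)
lemma czechGo_small (f : Nat) (r : Int) (h : r < 100) : czechGo (f + 1) r = czechGo 1 r := by
  simp only [czechGo]
  split_ifs <;> first | rfl | omega

lemma czechGo_eq_word (f : Nat) (hf : 1 ≤ f) (r : Int) (h : r < 100) : czechGo f r = czech_number_word r := by
  obtain ⟨g, rfl⟩ : ∃ g, f = g + 1 := ⟨f - 1, by omega⟩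
  rw [czech_number_word, czechGo_small g r h, czechGo_small r.toNat r h]

lemma join_one (x : String) : PySem.Str.join " " [x] = x := by
  simp [PySem.Str.join, PySem.Chars.join, List.intercalate]

lemma join_two (x y : String) : PySem.Str.join " " [x, y] = x ++ " " ++ y := by
  apply String.toList_inj.mp
  simp [PySem.Str.join, PySem.Chars.join, List.intercalate]

lemma join_three (x y z : String) : PySem.Str.join " " [x, y, z] = x ++ " " ++ y ++ " " ++ z := by
  apply String.toList_inj.mp
  simp [PySem.Str.join, PySem.Chars.join, List.intercalate]

-- the two ports agree on 0..99 (finite check, kernel-evaluated)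
set_option maxRecDepth 100000 in
set_option maxHeartbeats 1000000 in
lemma czech_small_agree :
    (List.range 100).all (fun m => czech_number_word (m : Int) == czech_number_word_alt (m : Int)) = true := by
  decide

lemma czech_small (n : Int) (h0 : 0 ≤ n) (h : n < 100) :
    czech_number_word n = czech_number_word_alt n := by
  have hlt : n.toNat < 100 := by omega
  have := List.all_eq_true.mp czech_small_agree n.toNat (List.mem_range.mpr hlt)
  have heq : (n.toNat : Int) = n := by omega
  rw [heq] at this
  exact eq_of_beq this

lemma czech_big_agree (n : Int) (h : 1000 ≤ n) :
    czech_number_word n = czech_number_word_alt n := by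
  have h0 : ¬ n = 0 := by omega
  have h20 : ¬ n < 20 := by omega
  have h100 : ¬ n < 100 := by omega
  have h1000 : ¬ n < 1000 := by omega
  have hb : n < 0 ∨ 1000 ≤ n := Or.inr h
  simp only [czech_number_word, czech_number_word_alt, czechGo, if_neg h0, if_neg h20,
             if_neg h100, if_neg h1000, if_pos hb]

lemma word_small_lt20 (r : Int) (h0 : ¬ r = 0) (h : r < 20) :
    czech_number_word r = (PySem.List.pyGet? czechOnes r).getD "" := by
  rw [czech_number_word]
  simp only [czechGo, if_neg h0, if_pos h]

lemma word_tens (r : Int) (h20 : ¬ r < 20) (h100 : r < 100) :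
    czech_number_word r =
      (if PySem.Int.mod r 10 = 0 then (PySem.List.pyGet? czechTens (PySem.Int.floordiv r 10)).getD ""
       else (PySem.List.pyGet? czechTens (PySem.Int.floordiv r 10)).getD "" ++ " "
            ++ (PySem.List.pyGet? czechOnes (PySem.Int.mod r 10)).getD "") := by
  rw [czech_number_word]
  simp only [czechGo, if_neg (show ¬ r = 0 by omega), if_neg h20, if_pos h100]

lemma czech_mid (n : Int) (hlo : 100 ≤ n) (hhi : n < 1000) :
    czech_number_word n = czech_number_word_alt n := by
  have hpos : (0:Int) < 100 := by omega
  have hr0 : 0 ≤ PySem.Int.mod n 100 := PySem.Int.mod_nonneg (a := n) hpos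
  have hr1 : PySem.Int.mod n 100 < 100 := PySem.Int.mod_lt (a := n) hpos
  rw [czech_number_word, czech_number_word_alt]
  simp only [czechGo, if_neg (show ¬ n = 0 by omega), if_neg (show ¬ n < 20 by omega),
             if_neg (show ¬ n < 100 by omega), if_pos hhi,
             if_neg (show ¬ (n < 0 ∨ 1000 ≤ n) by omega), if_pos hlo]
  rw [czechGo_eq_word n.toNat (by omega) _ hr1]
  generalize (if PySem.Int.floordiv n 100 = 1 then "sto"
      else if PySem.Int.floordiv n 100 = 2 then "dveste"
      else (PySem.List.pyGet? czechOnes (PySem.Int.floordiv n 100)).getD "" ++ " set") = p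
  by_cases hzz : PySem.Int.mod n 100 = 0
  · rw [if_neg (show ¬ PySem.Int.mod n 100 ≠ 0 by omega),
        if_neg (show ¬ (0 < PySem.Int.mod n 100 ∧ PySem.Int.mod n 100 < 20) by omega),
        if_neg (show ¬ 20 ≤ PySem.Int.mod n 100 by omega)]
    simp [join_one]
  · rw [if_pos (show PySem.Int.mod n 100 ≠ 0 from hzz)]
    by_cases hsm : PySem.Int.mod n 100 < 20
    · rw [word_small_lt20 _ hzz hsm,
          if_pos (show 0 < PySem.Int.mod n 100 ∧ PySem.Int.mod n 100 < 20 by omega)]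
      simp [join_two, String.append_assoc]
    · rw [word_tens _ hsm hr1,
          if_neg (show ¬ (0 < PySem.Int.mod n 100 ∧ PySem.Int.mod n 100 < 20) by omega),
          if_pos (show 20 ≤ PySem.Int.mod n 100 by omega)]
      by_cases ht : PySem.Int.mod (PySem.Int.mod n 100) 10 = 0
      · rw [if_pos ht, if_neg (show ¬ PySem.Int.mod (PySem.Int.mod n 100) 10 ≠ 0 by omega)]
        simp [join_two, String.append_assoc]
      · rw [if_neg ht, if_pos (show PySem.Int.mod (PySem.Int.mod n 100) 10 ≠ 0 from ht)]
        simp [join_three, String.append_assoc]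

-- ===== VERDICT (by name: the statement is the Claim_ definition above) =====
theorem czech_number_word_spec : Claim_unchanged_czech_number_word := by
  intro n _ hpre hnd
  unfold Pre_czech_number_word at hpre
  unfold D_czech_number_word at hnd
  by_cases hbig : 1000 ≤ n
  · exact czech_big_agree n hbig
  · by_cases hmid : 100 ≤ n
    · exact czech_mid n hmid (by omega)
    · exact czech_small n (by omega) (by omega)

theorem czech_number_word_changed : Claim_changed_czech_number_word := by
  unfold Claim_changed_czech_number_word; decide

theorem czech_number_word_tight : Claim_exact_czech_number_word := by
  intro n _ _ hd
  unfold D_czech_number_word at hd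
  -- finite check over the 20 integers -20..-1
  have hall : ∀ m ∈ (List.range 20), czech_number_word (-20 + (m : Int)) ≠ czech_number_word_alt (-20 + (m : Int)) := by decide
  have hk : (n + 20).toNat ∈ List.range 20 := List.mem_range.mpr (by omega)
  have := hall _ hk
  have heq : -20 + (((n + 20).toNat : Nat) : Int) = n := by omega
  rwa [heq] at this
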